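-- pv_equiv track=rewrite | github.com/shashiRS/FFL_CL_validation | pl_parking/pl_parking/PLP/LOC/common_ft_helper.py | get_time_intervals_with_indices
-- ===== SOURCE A (Python) =====
-- def get_time_intervals_with_indices(cycle_counter, threshold=1):
--     """
--     Identify time intervals and their indices in non-continuous cycle counter data.
--
--     :param cycle_counter: List of cycle counter values (assumed to be sorted).
--     :param threshold: Difference threshold to identify gaps in the cycle counter.
--     :return: List of time intervals, each represented as a dictionary with 'start', 'end', 'start_index', and 'end_index'.
--     """
--     if not cycle_counter:
--         return []
--
--     intervals = []
--     start = cycle_counter[0]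
--     start_index = 0
--     previous = cycle_counter[0]
--
--     for i, current in enumerate(cycle_counter[1:], start=1):
--         if current - previous > threshold:
--             intervals.append({"start": start, "end": previous, "start_index": start_index, "end_index": i - 1})
--             start = current
--             start_index = i
--         previous = current
--
--     intervals.append({"start": start, "end": previous, "start_index": start_index, "end_index": len(cycle_counter) - 1})
--     return intervals
-- ===== SOURCE B (Python) =====
-- def get_time_intervals_with_indices(cycle_counter, threshold=1):
--     if not cycle_counter:
--         return []
--     n = len(cycle_counter)
--     breaks = [i for i in range(1, n)
--               if cycle_counter[i] - cycle_counter[i - 1] > threshold]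
--     bounds = [0] + breaks + [n]
--     return [
--         {"start": cycle_counter[s], "end": cycle_counter[e - 1],
--          "start_index": s, "end_index": e - 1}
--         for s, e in zip(bounds, bounds[1:])
--     ]
-- ===== Notes on version B (the rewrite author's own statement) =====
-- stated objective: alternative
-- what changed: Replaces the single stateful scan (carrying start/start_index/previous and emitting on each gap) by a two-phase boundary decomposition: first collect gap indices into a breaks list, then build each interval directly from consecutive boundary pairs.
import Mathlib
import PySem

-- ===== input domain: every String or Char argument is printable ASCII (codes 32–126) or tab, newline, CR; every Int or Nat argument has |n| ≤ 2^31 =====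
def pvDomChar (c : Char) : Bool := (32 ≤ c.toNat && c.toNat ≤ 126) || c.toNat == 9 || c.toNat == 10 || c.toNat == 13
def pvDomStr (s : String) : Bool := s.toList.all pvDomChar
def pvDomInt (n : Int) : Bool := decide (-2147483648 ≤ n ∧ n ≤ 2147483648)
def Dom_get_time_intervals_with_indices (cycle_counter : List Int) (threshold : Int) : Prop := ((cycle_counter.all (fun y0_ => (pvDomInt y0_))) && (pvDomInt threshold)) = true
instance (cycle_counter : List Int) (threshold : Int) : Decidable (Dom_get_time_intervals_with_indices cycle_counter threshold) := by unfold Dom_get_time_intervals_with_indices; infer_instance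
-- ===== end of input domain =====

-- B replaces A's single stateful gap scan by a boundary decomposition (collect break
-- indices, then build each interval from consecutive boundary pairs); objective: alternative.

-- shared interval-dict literal: {"start": s, "end": e, "start_index": si, "end_index": ei}
def pvMk (s e : Int) (si ei : Nat) : List (String × Int) :=
  [("start", s), ("end", e), ("start_index", (si : Int)), ("end_index", (ei : Int))]

-- ===== PORT A =====
def get_time_intervals_with_indices (cycle_counter : List Int) (threshold : Int) : List (List (String × Int)) :=
  match cycle_counter with
  | [] => []
  | c0 :: rest =>
    -- state: (intervals, start, start_index, previous); loop = enumerate(cycle_counter[1:], start=1)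
    let st := (rest.zipIdx 1).foldl
      (fun (s : List (List (String × Int)) × Int × Nat × Int) (p : Int × Nat) =>
        if p.1 - s.2.2.2 > threshold then
          (s.1 ++ [pvMk s.2.1 s.2.2.2 s.2.2.1 (p.2 - 1)], p.1, p.2, p.1)
        else
          (s.1, s.2.1, s.2.2.1, p.1))
      ([], c0, 0, c0)
    st.1 ++ [pvMk st.2.1 st.2.2.2 st.2.2.1 (cycle_counter.length - 1)]

-- ===== PORT B =====
def get_time_intervals_with_indices_alt (cycle_counter : List Int) (threshold : Int) : List (List (String × Int)) :=
  match cycle_counter with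
  | [] => []
  | _ :: _ =>
    let n := cycle_counter.length
    let breaks := (List.range' 1 (n - 1)).filter
      (fun i => decide (cycle_counter.getD i 0 - cycle_counter.getD (i - 1) 0 > threshold))
    let bounds := 0 :: (breaks ++ [n])
    (bounds.zip bounds.tail).map
      (fun p => pvMk (cycle_counter.getD p.1 0) (cycle_counter.getD (p.2 - 1) 0) p.1 (p.2 - 1))

-- ===== PRECONDITION & SPEC =====
def Spec_get_time_intervals_with_indices (cycle_counter : List Int) (threshold : Int) (out : List (List (String × Int))) : Prop := out = get_time_intervals_with_indices_alt cycle_counter threshold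
instance (cycle_counter : List Int) (threshold : Int) (out : List (List (String × Int))) : Decidable (Spec_get_time_intervals_with_indices cycle_counter threshold out) := by unfold Spec_get_time_intervals_with_indices; infer_instance

-- ===== CLAIM (what is proved, stated in full; the proofs are below) =====
def Claim_equal_get_time_intervals_with_indices : Prop := ∀ (cycle_counter : List Int) (threshold : Int), Dom_get_time_intervals_with_indices cycle_counter threshold → Spec_get_time_intervals_with_indices cycle_counter threshold (get_time_intervals_with_indices cycle_counter threshold)

-- ===== LEMMAS AND PROOFS =====

-- common recursive characterisation of the segment list
def pvGo (th start prev : Int) (si i : Nat) : List Int → List (List (String × Int))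
  | [] => [pvMk start prev si (i - 1)]
  | c :: cs =>
    if c - prev > th then pvMk start prev si (i - 1) :: pvGo th c c i (i + 1) cs
    else pvGo th start c si (i + 1) cs

lemma pvFoldA (th : Int) (rest : List Int) : ∀ (acc : List (List (String × Int))) (start prev : Int) (si i : Nat),
    (let st := (rest.zipIdx i).foldl
      (fun (s : List (List (String × Int)) × Int × Nat × Int) (p : Int × Nat) =>
        if p.1 - s.2.2.2 > th then
          (s.1 ++ [pvMk s.2.1 s.2.2.2 s.2.2.1 (p.2 - 1)], p.1, p.2, p.1)
        else
          (s.1, s.2.1, s.2.2.1, p.1))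
      (acc, start, si, prev)
     st.1 ++ [pvMk st.2.1 st.2.2.2 st.2.2.1 (i + rest.length - 1)])
    = acc ++ pvGo th start prev si i rest := by
  induction rest with
  | nil => intro acc start prev si i; simp [pvGo]
  | cons c cs ih =>
    intro acc start prev si i
    simp only [List.zipIdx_cons, List.foldl_cons]
    by_cases h : c - prev > th
    · simp only [pvGo, List.length_cons]
      rw [if_pos h, if_pos h]
      have h1 : i + (cs.length + 1) - 1 = (i + 1) + cs.length - 1 := by omega
      rw [h1]
      have := ih (acc ++ [pvMk start prev si (i - 1)]) c c i (i + 1)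
      simp only at this
      rw [this, List.append_assoc]
      simp
    · simp only [pvGo, List.length_cons]
      rw [if_neg h, if_neg h]
      have h1 : i + (cs.length + 1) - 1 = (i + 1) + cs.length - 1 := by omega
      rw [h1]
      have := ih acc start c si (i + 1)
      simp only at this
      exact this

def pvChain (a : Nat) : List Nat → List (Nat × Nat)
  | [] => []
  | b :: bs => (a, b) :: pvChain b bs

lemma pvZipChain (l : List Nat) : ∀ a : Nat, (a :: l).zip l = pvChain a l := by
  induction l with
  | nil => intro a; rfl
  | cons b bs ih => intro a; simp only [List.zip_cons_cons, pvChain]; rw [ih b]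

lemma pvGetD_drop (cc : List Int) (i : Nat) (c : Int) (cs : List Int)
    (h : cc.drop i = c :: cs) : cc.getD i 0 = c := by
  have h0 : cc[i]? = some c := by
    have h2 : (cc.drop i)[0]? = some c := by rw [h]; rfl
    simpa [List.getElem?_drop] using h2
  simp [List.getD_eq_getElem?_getD, h0]

lemma pvB (cc : List Int) (th : Int) :
    ∀ (cs : List Int) (i si : Nat) (start prev : Int),
    1 ≤ i → si < i → i ≤ cc.length → cc.drop i = cs →
    cc.getD si 0 = start → cc.getD (i - 1) 0 = prev →
    ((pvChain si (((List.range' i (cc.length - i)).filter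
        (fun j => decide (cc.getD j 0 - cc.getD (j - 1) 0 > th))) ++ [cc.length])).map
      (fun p => pvMk (cc.getD p.1 0) (cc.getD (p.2 - 1) 0) p.1 (p.2 - 1)))
    = pvGo th start prev si i cs := by
  intro cs
  induction cs with
  | nil =>
    intro i si start prev h1 hsi hle hdrop hst hpr
    have hin : i = cc.length := by
      have := List.drop_eq_nil_iff.mp hdrop
      omega
    subst hin
    simp only [Nat.sub_self, List.range'_zero, List.filter_nil, List.nil_append,
      pvChain, List.map_cons, List.map_nil, pvGo]
    rw [hst, hpr]
  | cons c cs' ih =>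
    intro i si start prev h1 hsi hle hdrop hst hpr
    have hiltn : i < cc.length := by
      by_contra h
      have : cc.drop i = [] := List.drop_eq_nil_iff.mpr (by omega)
      rw [hdrop] at this; exact absurd this (by simp)
    have hci : cc.getD i 0 = c := pvGetD_drop cc i c cs' hdrop
    have hdrop' : cc.drop (i + 1) = cs' := by
      have h2 : (cc.drop i).drop 1 = cs' := by rw [hdrop]; rfl
      rwa [List.drop_drop] at h2
    have hrange : cc.length - i = (cc.length - (i + 1)) + 1 := by omega
    rw [hrange, List.range'_succ, List.filter_cons]
    by_cases h : c - prev > th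
    · rw [if_pos (by rw [hci, hpr]; exact decide_eq_true h)]
      simp only [List.cons_append, pvChain, List.map_cons]
      rw [hst, hpr]
      rw [ih (i + 1) i c c (by omega) (by omega) (by omega) hdrop' hci (by simpa using hci)]
      simp [pvGo, h]
    · rw [if_neg (by rw [hci, hpr]; simp [h])]
      rw [ih (i + 1) si start c (by omega) (by omega) (by omega) hdrop' hst (by simpa using hci)]
      simp [pvGo, h]

-- ===== VERDICT (by name: the statement is the Claim_ definition above) =====
theorem get_time_intervals_with_indices_spec : Claim_equal_get_time_intervals_with_indices := by
  intro cc th _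
  unfold Spec_get_time_intervals_with_indices
  match cc with
  | [] => rfl
  | c0 :: rest =>
    show get_time_intervals_with_indices (c0 :: rest) th
        = get_time_intervals_with_indices_alt (c0 :: rest) th
    have hA : get_time_intervals_with_indices (c0 :: rest) th
        = pvGo th c0 c0 0 1 rest := by
      simp only [get_time_intervals_with_indices, List.length_cons]
      have h3 : rest.length + 1 - 1 = 1 + rest.length - 1 := by omega
      have := pvFoldA th rest [] c0 c0 0 1
      simp only at this
      rw [h3, this]
      simp
    have hB : get_time_intervals_with_indices_alt (c0 :: rest) th
        = pvGo th c0 c0 0 1 rest := by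
      simp only [get_time_intervals_with_indices_alt, List.tail_cons]
      rw [pvZipChain]
      exact pvB (c0 :: rest) th rest 1 0 c0 c0 (le_refl 1) (by omega)
        (by simp) rfl rfl rfl
    rw [hA, hB]
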